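-- pv_equiv track=rewrite | github.com/csimong/rosetta_cm_utils | octopus2span.py | extract_tm_spans
-- ===== SOURCE A (Python) =====
-- from typing import List, Optional, Tuple
--
-- def extract_tm_spans(topo: str) -> List[Tuple[int, int]]:
--     """
--     Extract contiguous 'M' segments, 1-based inclusive (start, end).
--     """
--     spans: List[Tuple[int, int]] = []
--     i = 0
--     n = len(topo)
--     while i < n:
--         if topo[i] == "M":
--             start = i + 1
--             j = i
--             while j < n and topo[j] == "M":
--                 j += 1
--             end = j  # because j is 0-based index after run, so end is j in 1-based
--             spans.append((start, end))
--             i = j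
--         else:
--             i += 1
--     return spans
-- ===== SOURCE B (Python) =====
-- from typing import List, Tuple
--
-- def extract_tm_spans(topo: str) -> List[Tuple[int, int]]:
--     """Single forward pass as a state machine: remember the 1-based start of the
--     current 'M' run (or None) and emit a span when the run closes."""
--     spans: List[Tuple[int, int]] = []
--     start = None
--     for pos, ch in enumerate(topo, 1):
--         if ch == "M":
--             if start is None:
--                 start = pos
--         elif start is not None:
--             spans.append((start, pos - 1))
--             start = None
--     if start is not None:
--         spans.append((start, len(topo)))
--     return spans
-- ===== Notes on version B (the rewrite author's own statement) =====
-- stated objective: simpler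
-- what changed: Replaced A's nested while-loops with index arithmetic (an inner scan finds each run's end) by a single state-machine pass over enumerate(topo,1) that remembers the open run's start and emits a span when the run closes.
import Mathlib
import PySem

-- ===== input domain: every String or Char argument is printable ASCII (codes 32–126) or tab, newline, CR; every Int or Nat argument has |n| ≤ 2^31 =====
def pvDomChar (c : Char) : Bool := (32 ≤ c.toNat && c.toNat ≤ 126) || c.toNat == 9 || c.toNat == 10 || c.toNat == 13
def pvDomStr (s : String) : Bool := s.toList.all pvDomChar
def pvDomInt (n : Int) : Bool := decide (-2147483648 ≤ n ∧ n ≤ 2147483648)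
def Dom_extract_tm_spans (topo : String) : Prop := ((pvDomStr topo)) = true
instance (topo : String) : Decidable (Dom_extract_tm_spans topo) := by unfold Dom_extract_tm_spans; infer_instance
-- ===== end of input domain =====

-- B replaces A's nested while-loops (inner scan per run) by a single state-machine pass; same O(n) cost, simpler.


-- ===== PORT A =====
-- inner 'while j < n and topo[j] == "M"': the guard j < n makes the index in range, so getD is exact
def pvRunEnd (cs : List Char) (n j : Nat) : Nat :=
  if j < n ∧ cs.getD j ' ' = 'M' then pvRunEnd cs n (j+1) else j
termination_by n - j
decreasing_by omega

theorem pvRunEnd_ge (cs : List Char) (n j : Nat) : j ≤ pvRunEnd cs n j := by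
  unfold pvRunEnd
  split
  · exact le_trans (by omega) (pvRunEnd_ge cs n (j+1))
  · exact le_rfl
termination_by n - j
decreasing_by omega

theorem pvRunEnd_gt (cs : List Char) (n j : Nat) (h1 : j < n) (h2 : cs.getD j ' ' = 'M') :
    j < pvRunEnd cs n j := by
  unfold pvRunEnd
  rw [if_pos ⟨h1, h2⟩]
  exact lt_of_lt_of_le (Nat.lt_succ_self j) (pvRunEnd_ge cs n (j+1))

-- outer while loop of A; spans is the accumulator
def pvALoop (cs : List Char) (n i : Nat) (spans : List (Int × Int)) : List (Int × Int) :=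
  if h : i < n then
    if hm : cs.getD i ' ' = 'M' then
      let j := pvRunEnd cs n i
      pvALoop cs n j (spans ++ [((i : Int) + 1, (j : Int))])
    else
      pvALoop cs n (i+1) spans
  else spans
termination_by n - i
decreasing_by
  · have := pvRunEnd_gt cs n i h hm; omega
  · omega

def extract_tm_spans (topo : String) : List (Int × Int) :=
  pvALoop topo.toList topo.toList.length 0 []

-- ===== PORT B =====
-- one step of B's for-loop: state = (spans so far, start of the open 'M' run, if any)
def pvBStep (st : List (Int × Int) × Option Int) (pc : Int × Char) :
    List (Int × Int) × Option Int :=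
  if pc.2 = 'M' then
    match st.2 with
    | none => (st.1, some pc.1)
    | some s => (st.1, some s)
  else
    match st.2 with
    | some s => (st.1 ++ [(s, pc.1 - 1)], none)
    | none => st

def extract_tm_spans_alt (topo : String) : List (Int × Int) :=
  let cs := topo.toList
  let st := (PySem.List.enumerate cs 1).foldl pvBStep ([], none)
  match st.2 with
  | some s => st.1 ++ [(s, (cs.length : Int))]
  | none => st.1

-- ===== PRECONDITION & SPEC =====
def Spec_extract_tm_spans (topo : String) (out : List (Int × Int)) : Prop := out = extract_tm_spans_alt topo
instance (topo : String) (out : List (Int × Int)) : Decidable (Spec_extract_tm_spans topo out) := by unfold Spec_extract_tm_spans; infer_instance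

-- ===== CLAIM (what is proved, stated in full; the proofs are below) =====
def Claim_equal_extract_tm_spans : Prop := ∀ (topo : String), Dom_extract_tm_spans topo → Spec_extract_tm_spans topo (extract_tm_spans topo)

-- ===== LEMMAS AND PROOFS =====

-- unfolding equations for the well-founded recursions above
theorem pvRunEnd_id (cs : List Char) (n j : Nat) (h : ¬(j < n ∧ cs.getD j ' ' = 'M')) :
    pvRunEnd cs n j = j := by
  conv_lhs => rw [pvRunEnd]
  rw [if_neg h]

theorem pvRunEnd_M (cs : List Char) (n j : Nat) (h1 : j < n) (h2 : cs.getD j ' ' = 'M') :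
    pvRunEnd cs n j = pvRunEnd cs n (j+1) := by
  conv_lhs => rw [pvRunEnd]
  rw [if_pos ⟨h1, h2⟩]

theorem pvRunEnd_stop (cs : List Char) (n j : Nat) :
    ¬(pvRunEnd cs n j < n ∧ cs.getD (pvRunEnd cs n j) ' ' = 'M') := by
  by_cases h : j < n ∧ cs.getD j ' ' = 'M'
  · rw [pvRunEnd_M cs n j h.1 h.2]
    exact pvRunEnd_stop cs n (j+1)
  · rw [pvRunEnd_id cs n j h]
    exact h
termination_by n - j
decreasing_by omega

theorem pvALoop_stop (cs : List Char) (n i : Nat) (spans : List (Int × Int)) (h : ¬ i < n) :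
    pvALoop cs n i spans = spans := by
  conv_lhs => rw [pvALoop]
  rw [dif_neg h]

theorem pvALoop_skip (cs : List Char) (n i : Nat) (spans : List (Int × Int))
    (h : i < n) (hm : ¬ cs.getD i ' ' = 'M') :
    pvALoop cs n i spans = pvALoop cs n (i+1) spans := by
  conv_lhs => rw [pvALoop]
  rw [dif_pos h, dif_neg hm]

theorem pvALoop_run (cs : List Char) (n i : Nat) (spans : List (Int × Int))
    (h : i < n) (hm : cs.getD i ' ' = 'M') :
    pvALoop cs n i spans =
      pvALoop cs n (pvRunEnd cs n i) (spans ++ [((i : Int) + 1, (pvRunEnd cs n i : Int))]) := by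
  conv_lhs => rw [pvALoop]
  rw [dif_pos h, dif_pos hm]

-- B's fold over the suffix cs.drop i (positions i+1, i+2, …), then the final flush
def pvBRun (cs : List Char) (i : Nat) (st : List (Int × Int) × Option Int) : List (Int × Int) :=
  let st' := (PySem.List.enumerate (cs.drop i) ((i : Int) + 1)).foldl pvBStep st
  match st'.2 with
  | some s => st'.1 ++ [(s, (cs.length : Int))]
  | none => st'.1

theorem pvBRun_cons (cs : List Char) (i : Nat) (hi : i < cs.length)
    (st : List (Int × Int) × Option Int) :
    pvBRun cs i st = pvBRun cs (i+1) (pvBStep st ((i : Int) + 1, cs.getD i ' ')) := by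
  unfold pvBRun
  have hd : cs.drop i = cs.getD i ' ' :: cs.drop (i+1) := by
    rw [List.getD_eq_getElem cs ' ' hi]
    exact (List.getElem_cons_drop hi).symm
  rw [hd, PySem.List.enumerate_cons]
  have : ((i : Int) + 1 + 1) = ((i + 1 : Nat) : Int) + 1 := by push_cast; ring
  rw [List.foldl_cons, this]

theorem pvBRun_stop (cs : List Char) (st : List (Int × Int) × Option Int) :
    pvBRun cs cs.length st =
      match st.2 with
      | some s => st.1 ++ [(s, (cs.length : Int))]
      | none => st.1 := by
  unfold pvBRun
  rw [List.drop_length, PySem.List.enumerate_nil, List.foldl_nil]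

theorem pvMain (cs : List Char) (k : Nat) :
    ∀ i, cs.length - i = k → i ≤ cs.length →
    ((∀ spans, pvBRun cs i (spans, none) = pvALoop cs cs.length i spans) ∧
     (∀ s spans,
      pvBRun cs i (spans, some s) =
        pvALoop cs cs.length (pvRunEnd cs cs.length i)
          (spans ++ [(s, (pvRunEnd cs cs.length i : Int))]))) := by
  induction k using Nat.strong_induction_on with
  | _ k IH =>
    intro i hk hi
    constructor
    · intro spans
      by_cases hlt : i < cs.length
      · by_cases hm : cs.getD i ' ' = 'M'
        · rw [pvBRun_cons cs i hlt]
          have hstep : pvBStep (spans, none) ((i : Int) + 1, cs.getD i ' ')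
              = (spans, some ((i : Int) + 1)) := by
            simp only [pvBStep]
            rw [if_pos hm]
          rw [hstep]
          have h2 := ((IH (cs.length - (i+1)) (by omega) (i+1) rfl (by omega)).2
            ((i : Int) + 1) spans)
          rw [h2, ← pvRunEnd_M cs cs.length i hlt hm,
            pvALoop_run cs cs.length i spans hlt hm]
        · rw [pvBRun_cons cs i hlt]
          have hstep : pvBStep (spans, none) ((i : Int) + 1, cs.getD i ' ')
              = (spans, none) := by
            simp only [pvBStep]
            rw [if_neg hm]
          rw [hstep, pvALoop_skip cs cs.length i spans hlt hm]
          exact ((IH (cs.length - (i+1)) (by omega) (i+1) rfl (by omega)).1 spans)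
      · have hie : i = cs.length := by omega
        rw [hie, pvBRun_stop, pvALoop_stop cs cs.length cs.length spans (by omega)]
    · intro s spans
      by_cases hlt : i < cs.length
      · by_cases hm : cs.getD i ' ' = 'M'
        · rw [pvBRun_cons cs i hlt]
          have hstep : pvBStep (spans, some s) ((i : Int) + 1, cs.getD i ' ')
              = (spans, some s) := by
            simp only [pvBStep]
            rw [if_pos hm]
          rw [hstep, pvRunEnd_M cs cs.length i hlt hm]
          exact ((IH (cs.length - (i+1)) (by omega) (i+1) rfl (by omega)).2 s spans)
        · rw [pvBRun_cons cs i hlt]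
          have hstep : pvBStep (spans, some s) ((i : Int) + 1, cs.getD i ' ')
              = (spans ++ [(s, (i : Int))], none) := by
            simp only [pvBStep]
            rw [if_neg hm]
            norm_num
          rw [hstep]
          have hre : pvRunEnd cs cs.length i = i :=
            pvRunEnd_id cs cs.length i (by tauto)
          rw [hre]
          have h1 := ((IH (cs.length - (i+1)) (by omega) (i+1) rfl (by omega)).1
            (spans ++ [(s, (i : Int))]))
          rw [h1, ← pvALoop_skip cs cs.length i (spans ++ [(s, (i : Int))]) hlt hm]
      · have hie : i = cs.length := by omega
        have hre : pvRunEnd cs cs.length cs.length = cs.length :=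
          pvRunEnd_id cs cs.length cs.length (by omega)
        rw [hie, pvBRun_stop, hre, pvALoop_stop cs cs.length cs.length _ (by omega)]

theorem extract_tm_spans_eq (topo : String) :
    extract_tm_spans topo = extract_tm_spans_alt topo := by
  have h := (pvMain topo.toList topo.toList.length 0 (by omega) (by omega)).1 []
  unfold extract_tm_spans extract_tm_spans_alt
  rw [← h]
  unfold pvBRun
  norm_num

-- ===== VERDICT (by name: the statement is the Claim_ definition above) =====
theorem extract_tm_spans_spec : Claim_equal_extract_tm_spans := by
  intro topo _
  unfold Spec_extract_tm_spans
  exact extract_tm_spans_eq topo
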